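-- pv_equiv track=rewrite | github.com/eladsegal/tag-based-multi-span-extraction | src/data/tokenizers/tokenization_utils.py | _get_max_space_length
-- ===== SOURCE A (Python) =====
-- def _get_max_space_length(text):
--     max_space_length = 0
--     count = False
--     for i, c in enumerate(text):
--         if c == " ":
--             if not count:
--                 count = True
--                 start_index = i
--         else:
--             if count:
--                 count = False
--                 max_space_length = max(max_space_length, i - start_index)
--     return max_space_length
-- ===== SOURCE B (Python) =====
-- import re
--
-- def _get_max_space_length(text):
--     # maximal runs of spaces that are followed by a non-space character;
--     # a trailing run of spaces is not followed by anything, so it does not count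
--     return max(map(len, re.findall(r' +(?=[^ ])', text)), default=0)
-- ===== Notes on version B (the rewrite author's own statement) =====
-- stated objective: idiomatic
-- what changed: Replaced the stateful per-character index-tracking scan (count flag + start_index) with a regex one-liner: re.findall(r' +(?=[^ ])', text) yields the maximal space runs followed by a non-space, and the result is the max of their lengths (default 0); the scan runs in the C regex engine instead of the Python bytecode loop.
import Mathlib
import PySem

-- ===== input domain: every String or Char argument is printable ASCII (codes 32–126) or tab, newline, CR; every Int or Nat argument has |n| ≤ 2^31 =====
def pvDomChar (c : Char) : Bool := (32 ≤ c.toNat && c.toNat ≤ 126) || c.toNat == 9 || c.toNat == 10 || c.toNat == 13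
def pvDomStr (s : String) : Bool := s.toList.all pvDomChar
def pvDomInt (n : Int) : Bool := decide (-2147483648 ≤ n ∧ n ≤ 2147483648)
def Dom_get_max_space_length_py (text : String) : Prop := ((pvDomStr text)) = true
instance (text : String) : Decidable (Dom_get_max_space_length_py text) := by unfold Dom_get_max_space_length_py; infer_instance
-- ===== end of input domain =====

-- B replaces A's stateful count/start_index scan with a regex findall of space runs
-- followed by a non-space and takes the max length (idiomatic; same behaviour).

-- ===== PORT A =====
-- loop body of A's for-loop over enumerate(text): state = (max_space_length, count, start_index)
def pvAStep (s : Int × Bool × Int) (ic : Int × Char) : Int × Bool × Int :=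
  if ic.2 = ' ' then
    if !s.2.1 then (s.1, true, ic.1) else s
  else
    if s.2.1 then (max s.1 (ic.1 - s.2.2), false, s.2.2) else s

def get_max_space_length_py (text : String) : Int :=
  ((PySem.List.enumerate text.toList 0).foldl pvAStep ((0 : Int), (false : Bool), (0 : Int))).1

-- ===== PORT B =====
-- hand port of re.findall(r' +(?=[^ ])', text): the lengths of the leftmost-maximal
-- runs of ' ' that are immediately followed by a non-space character (exact: a maximal
-- space run is followed by a non-space iff it is not at the end of the string).
def pvSpaceRuns : List Char → Nat → List Nat
  | [], _ => []
  | c :: rest, cur =>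
    if c = ' ' then pvSpaceRuns rest (cur + 1)
    else if cur ≠ 0 then cur :: pvSpaceRuns rest 0
    else pvSpaceRuns rest 0

-- max(map(len, matches), default=0)
def get_max_space_length_py_alt (text : String) : Int :=
  ((pvSpaceRuns text.toList 0).map Int.ofNat).foldl max 0

-- ===== PRECONDITION & SPEC =====
def Spec_get_max_space_length_py (text : String) (out : Int) : Prop := out = get_max_space_length_py_alt text
instance (text : String) (out : Int) : Decidable (Spec_get_max_space_length_py text out) := by unfold Spec_get_max_space_length_py; infer_instance

-- ===== CLAIM (what is proved, stated in full; the proofs are below) =====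
def Claim_equal_get_max_space_length_py : Prop := ∀ (text : String), Dom_get_max_space_length_py text → Spec_get_max_space_length_py text (get_max_space_length_py text)

-- ===== LEMMAS AND PROOFS =====

-- Invariant linking A's loop state to the runs B still has to find:
-- cur = length of the space run currently open, start = i - cur when a run is open.
lemma pv_loop_eq (l : List Char) : ∀ (i msl start : Int) (cur : Nat),
    (cur ≠ 0 → start = i - cur) →
    ((PySem.List.enumerate l i).foldl pvAStep (msl, decide (cur ≠ 0), start)).1
      = ((pvSpaceRuns l cur).map Int.ofNat).foldl max msl := by
  induction l with
  | nil =>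
    intro i msl start cur h
    simp [PySem.List.enumerate_nil, pvSpaceRuns]
  | cons c rest ih =>
    intro i msl start cur h
    rw [PySem.List.enumerate_cons, List.foldl_cons]
    by_cases hc : c = ' '
    · subst hc
      by_cases h0 : cur = 0
      · subst h0
        have h2 := ih (i + 1) msl i 1 (by intro _; push_cast; ring)
        simp only [ne_eq, one_ne_zero, not_false_eq_true, decide_true] at h2
        simpa [pvAStep, pvSpaceRuns] using h2
      · have h2 := ih (i + 1) msl start (cur + 1) (by intro _; rw [h h0]; push_cast; ring)
        simp only [ne_eq, Nat.succ_ne_zero, not_false_eq_true, decide_true] at h2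
        simpa [pvAStep, pvSpaceRuns, h0] using h2
    · by_cases h0 : cur = 0
      · subst h0
        have h2 := ih (i + 1) msl start 0 (by simp)
        simp only [ne_eq, not_true_eq_false, decide_false] at h2
        simpa [pvAStep, pvSpaceRuns, hc] using h2
      · have hs : i - start = (cur : Int) := by rw [h h0]; ring
        have h2 := ih (i + 1) (max msl (i - start)) start 0 (by simp)
        simp only [ne_eq, not_true_eq_false, decide_false] at h2
        simpa [pvAStep, pvSpaceRuns, hc, h0, hs] using h2

-- ===== VERDICT (by name: the statement is the Claim_ definition above) =====
theorem get_max_space_length_py_spec : Claim_equal_get_max_space_length_py := by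
  intro text _
  unfold Spec_get_max_space_length_py get_max_space_length_py get_max_space_length_py_alt
  have := pv_loop_eq text.toList 0 0 0 0 (by intro hh; exact absurd rfl hh)
  simpa using this
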